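-- pv_equiv track=rewrite | github.com/autonomous-agent-stack/autonomous-agent-stack | subtitle-offline-dev-kit/scripts/check_subtitle_contract.py | summarize_notes
-- ===== SOURCE A (Python) =====
-- from typing import Any, Iterable
--
-- CHECK_KEYS = ("missing_text", "end_before_start", "out_of_order")
--
-- def summarize_notes(lines: Iterable[dict[str, object]]) -> dict[str, int]:
--     """Count each supported anomaly flag from the line notes."""
--
--     summary = {key: 0 for key in CHECK_KEYS}
--     for line in lines:
--         note = line.get("note")
--         if not isinstance(note, str) or not note:
--             continue
--         flags = {part.strip() for part in note.split(";") if part.strip()}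
--         for key in CHECK_KEYS:
--             if key in flags:
--                 summary[key] += 1
--     return summary
-- ===== SOURCE B (Python) =====
-- CHECK_KEYS = ("missing_text", "end_before_start", "out_of_order")
--
-- def summarize_notes(lines):
--     """Materialize the notes once, then count each key by its own existential scan
--     (a segment of the ';'-split strips to the key), with no per-note set and no
--     running tally dict."""
--     notes = [line.get("note") for line in lines]
--     return {
--         key: sum(
--             1
--             for note in notes
--             if isinstance(note, str)
--             and any(part.strip() == key for part in note.split(";"))
--         )
--         for key in CHECK_KEYS
--     }
-- ===== Notes on version B (the rewrite author's own statement) =====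
-- stated objective: alternative
-- what changed: B materializes the notes once and then counts each of the three keys by its own pass with an existential test (does any ';'-segment strip to the key?), instead of A's single pass that builds a deduplicated flag set per note and increments a pre-seeded summary dict per key.
import Mathlib
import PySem

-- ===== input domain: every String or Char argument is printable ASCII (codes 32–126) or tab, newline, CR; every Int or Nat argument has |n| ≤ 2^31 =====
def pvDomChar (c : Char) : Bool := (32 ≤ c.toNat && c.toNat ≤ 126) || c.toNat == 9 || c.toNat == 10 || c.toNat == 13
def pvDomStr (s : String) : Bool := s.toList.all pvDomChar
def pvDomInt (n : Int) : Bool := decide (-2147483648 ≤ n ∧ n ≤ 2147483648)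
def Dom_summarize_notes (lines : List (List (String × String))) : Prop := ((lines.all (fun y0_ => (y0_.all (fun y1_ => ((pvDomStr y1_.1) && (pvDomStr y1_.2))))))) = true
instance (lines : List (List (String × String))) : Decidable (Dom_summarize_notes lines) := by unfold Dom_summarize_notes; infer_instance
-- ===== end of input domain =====

-- B materializes the notes once and counts each key by its own existential scan over the
-- ';'-segments, instead of A's one-pass per-note flag set updating a pre-seeded summary dict
-- (objective: alternative decomposition).

-- CHECK_KEYS, the module constant both Pythons share
def pvCheckKeys : List String := ["missing_text", "end_before_start", "out_of_order"]

-- ===== PORT A =====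
-- {part.strip() for part in note.split(";") if part.strip()}
-- (split? returns none only for an empty separator, so .getD [] is exact for sep ";")
def pvNoteFlags (note : String) : PySem.Set String :=
  PySem.Set.ofList
    ((((PySem.Str.split? note ";").getD []).filter (fun part => PySem.Str.strip part ≠ "")).map
      PySem.Str.strip)

-- the body of A's `for line in lines` loop
def pvStepA (summary : PySem.Dict String Int) (line : List (String × String)) :
    PySem.Dict String Int :=
  match (PySem.Dict.mk line).get? "note" with
  | none => summary                            -- not isinstance(note, str): continue
  | some note =>
    if note = "" then summary                  -- not note: continue
    else
      let flags := pvNoteFlags note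
      pvCheckKeys.foldl
        (fun s key => if key ∈ flags then s.modify key 0 (· + 1) else s) summary

def summarize_notes (lines : List (List (String × String))) : List (String × Int) :=
  let summary : PySem.Dict String Int :=
    pvCheckKeys.foldl (fun d key => d.insert key 0) PySem.Dict.empty
  (lines.foldl pvStepA summary).items

-- ===== PORT B =====
-- any(part.strip() == key for part in note.split(";"))
def pvHasKey (note : String) (key : String) : Bool :=
  ((PySem.Str.split? note ";").getD []).any (fun part => PySem.Str.strip part == key)

-- the body of B's counting generator: one note's contribution to sum(1 for …)
def pvStepB (key : String) (acc : Int) (note : Option String) : Int :=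
  match note with
  | some s => if pvHasKey s key then acc + 1 else acc   -- isinstance(note, str) and any(…)
  | none => acc

def summarize_notes_alt (lines : List (List (String × String))) : List (String × Int) :=
  let notes : List (Option String) :=
    lines.map (fun line => (PySem.Dict.mk line).get? "note")
  pvCheckKeys.map (fun key => (key, notes.foldl (pvStepB key) 0))

-- ===== PRECONDITION & SPEC =====
def Spec_summarize_notes (lines : List (List (String × String))) (out : List (String × Int)) : Prop := out = summarize_notes_alt lines
instance (lines : List (List (String × String))) (out : List (String × Int)) : Decidable (Spec_summarize_notes lines out) := by unfold Spec_summarize_notes; infer_instance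

-- ===== CLAIM (what is proved, stated in full; the proofs are below) =====
def Claim_equal_summarize_notes : Prop := ∀ (lines : List (List (String × String))), Dom_summarize_notes lines → Spec_summarize_notes lines (summarize_notes lines)

-- ===== LEMMAS AND PROOFS =====

-- the (deduplicated) flags a single line contributes (empty when the note is absent or empty)
def pvLineFlags (line : List (String × String)) : List String :=
  match (PySem.Dict.mk line).get? "note" with
  | none => []
  | some note => if note = "" then [] else pvNoteFlags note

-- B's existential test is membership in A's flag set, for a nonempty key
lemma pvHasKey_iff (note k : String) (hk : k ≠ "") :
    pvHasKey note k = true ↔ k ∈ pvNoteFlags note := by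
  unfold pvHasKey pvNoteFlags
  simp only [List.any_eq_true, beq_iff_eq, PySem.Set.mem_ofList, List.mem_map, List.mem_filter]
  constructor
  · rintro ⟨p, hp, he⟩
    exact ⟨p, ⟨hp, by simp [he, hk]⟩, he⟩
  · rintro ⟨p, ⟨hp, _⟩, he⟩
    exact ⟨p, hp, he⟩

lemma pvStepB_eq (k : String) (hk : k ≠ "") (acc : Int) (line : List (String × String)) :
    pvStepB k acc ((PySem.Dict.mk line).get? "note") =
      acc + ((pvLineFlags line).count k : Int) := by
  unfold pvStepB pvLineFlags
  cases (PySem.Dict.mk line).get? "note" with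
  | none => simp
  | some note =>
    by_cases h : note = ""
    · subst h
      have : pvHasKey "" k = false := by
        rw [← Bool.not_eq_true, pvHasKey_iff _ _ hk]
        intro hmem
        have : pvNoteFlags "" = [] := by decide
        simp [this] at hmem
      simp [this]
    · simp only [h, if_false]
      have hnd : (pvNoteFlags note).Nodup := PySem.Set.nodup_ofList _
      by_cases hmem : k ∈ pvNoteFlags note
      · rw [if_pos ((pvHasKey_iff _ _ hk).mpr hmem), List.count_eq_one_of_mem hnd hmem]
        push_cast; ring
      · rw [if_neg (by rw [pvHasKey_iff _ _ hk]; exact hmem),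
          List.count_eq_zero_of_not_mem hmem]
        simp

lemma pvStepA_getD (d : PySem.Dict String Int) (line : List (String × String)) (k : String)
    (hk : k ∈ pvCheckKeys) :
    (pvStepA d line).getD k 0 = d.getD k 0 + ((pvLineFlags line).count k : Int) := by
  unfold pvStepA pvLineFlags
  cases (PySem.Dict.mk line).get? "note" with
  | none => simp
  | some note =>
    by_cases h : note = ""
    · simp [h]
    · simp only [h, if_false]
      have hnd : (pvNoteFlags note).Nodup := PySem.Set.nodup_ofList _
      have hcount : ∀ x : String, ((pvNoteFlags note).count x : Int) =
          if x ∈ pvNoteFlags note then 1 else 0 := by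
        intro x
        by_cases hx : x ∈ pvNoteFlags note
        · simp [hx, List.count_eq_one_of_mem hnd hx]
        · simp [hx, List.count_eq_zero_of_not_mem hx]
      simp only [pvCheckKeys, List.mem_cons, List.not_mem_nil, or_false] at hk
      simp only [pvCheckKeys, List.foldl_cons, List.foldl_nil]
      rcases hk with hk | hk | hk
      all_goals subst hk
      all_goals split_ifs <;>
        simp_all [PySem.Dict.getD_modify]

-- the two folds agree key-wise, provided accumulators start key-wise equal
lemma pvFold_getD (k : String) (hk : k ∈ pvCheckKeys) (lines : List (List (String × String))) :
    ∀ (d : PySem.Dict String Int) (acc : Int), d.getD k 0 = acc →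
      (lines.foldl pvStepA d).getD k 0 =
        (lines.map (fun line => (PySem.Dict.mk line).get? "note")).foldl (pvStepB k) acc := by
  have hk' : k ≠ "" := by fin_cases hk <;> decide
  induction lines with
  | nil => intro d acc h; simpa using h
  | cons l rest ih =>
    intro d acc h
    simp only [List.foldl_cons, List.map_cons]
    exact ih _ _ (by rw [pvStepA_getD _ _ _ hk, pvStepB_eq _ hk', h])

lemma pvStepA_keys (d : PySem.Dict String Int) (line : List (String × String))
    (h : d.keys = pvCheckKeys) : (pvStepA d line).keys = pvCheckKeys := by
  unfold pvStepA
  cases (PySem.Dict.mk line).get? "note" with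
  | none => exact h
  | some note =>
    by_cases hn : note = ""
    · simpa [hn] using h
    · have hmod : ∀ (e : PySem.Dict String Int) (k : String), e.keys = pvCheckKeys →
          k ∈ pvCheckKeys → (e.modify k 0 (· + 1)).keys = pvCheckKeys := by
        intro e k he hkm
        have : e.contains k = true := by
          rw [PySem.Dict.contains_iff_mem_keys, he]; exact hkm
        simp only [PySem.Dict.modify]
        rw [PySem.Dict.keys_insert_of_contains _ _ this]
        exact he
      simp only [hn, if_false, pvCheckKeys, List.foldl_cons, List.foldl_nil]
      split_ifs <;>
        first
          | exact h
          | (repeat'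
              first
                | exact h
                | exact hmod _ _ (by assumption) (by simp [pvCheckKeys])
                | apply hmod _ _ _ (by simp [pvCheckKeys]))

lemma pvFoldA_keys (lines : List (List (String × String))) :
    ∀ (d : PySem.Dict String Int), d.keys = pvCheckKeys →
      (lines.foldl pvStepA d).keys = pvCheckKeys := by
  induction lines with
  | nil => intro d h; exact h
  | cons l rest ih => intro d h; exact ih _ (pvStepA_keys d l h)

-- ===== VERDICT (by name: the statement is the Claim_ definition above) =====
theorem summarize_notes_spec : Claim_equal_summarize_notes := by
  intro lines _
  unfold Spec_summarize_notes summarize_notes summarize_notes_alt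
  set d0 : PySem.Dict String Int :=
    pvCheckKeys.foldl (fun d key => d.insert key 0) PySem.Dict.empty with hd0
  have hkeys0 : d0.keys = pvCheckKeys := by rw [hd0]; decide
  have hkeys : (lines.foldl pvStepA d0).keys = pvCheckKeys := pvFoldA_keys lines d0 hkeys0
  rw [PySem.Dict.items_eq_map_keys _ (by rw [hkeys]; decide) 0, hkeys]
  apply List.map_congr_left
  intro k hk
  have h0 : d0.getD k 0 = 0 := by fin_cases hk <;> (rw [hd0]; decide)
  rw [pvFold_getD k hk lines d0 0 h0]
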